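-- pv_equiv track=rewrite | github.com/eliottcassidy2000/math | 03-artifacts/code/tournament_fast.py | c5_fast
-- ===== SOURCE A (Python) =====
-- def c5_fast(T):
--     """Count directed 5-cycles using trace formula. O(n^3).
--
--     By THM-096: tr(A^k) = k * c_k for k = 3, 4, 5 in tournaments.
--     This is because closed walks of length <= 5 in tournaments are
--     always simple cycles (no vertex repetition possible, since
--     tournaments have no bidirectional edges and any closed walk
--     has length >= 3, so repeating a vertex requires length >= 6).
--
--     Therefore: c_5 = tr(A^5) / 5.
--     Computed via matrix multiplication in O(n^3).
--     """
--     n = len(T)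
--     if n < 5:
--         return 0
--
--     # A^2
--     A2 = [[sum(T[i][k] * T[k][j] for k in range(n))
--            for j in range(n)] for i in range(n)]
--     # A^4 = A^2 * A^2
--     A4 = [[sum(A2[i][k] * A2[k][j] for k in range(n))
--            for j in range(n)] for i in range(n)]
--     # A^5 = A^4 * A
--     A5 = [[sum(A4[i][k] * T[k][j] for k in range(n))
--            for j in range(n)] for i in range(n)]
--     tr5 = sum(A5[i][i] for i in range(n))
--     return tr5 // 5
-- ===== SOURCE B (Python) =====
-- def c5_fast(T):
--     """Count directed 5-cycles: tr(A^5)//5, computed by propagating each row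
--     vector through the matrix (four matrix-vector products per row) and dotting
--     with the matching column; no matrix-matrix product is ever formed."""
--     n = len(T)
--     if n < 5:
--         return 0
--     tr5 = 0
--     for i in range(n):
--         w = [T[i][j] for j in range(n)]
--         for _ in range(3):
--             w = [sum(w[k] * T[k][j] for k in range(n)) for j in range(n)]
--         tr5 += sum(w[k] * T[k][i] for k in range(n))
--     return tr5 // 5
-- ===== Notes on version B (the rewrite author's own statement) =====
-- stated objective: alternative
-- what changed: B never forms a matrix-matrix product: for each row i it propagates the row vector through T by four matrix-vector multiplications and dots it with column i, accumulating the diagonal of A^5 with O(n) extra memory, where A builds the full A^2, A^4 and A^5 matrices; Pre_ excludes only ragged inputs with len(T)>=5 and a row shorter than len(T), on which A raises IndexError.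
import Mathlib
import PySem

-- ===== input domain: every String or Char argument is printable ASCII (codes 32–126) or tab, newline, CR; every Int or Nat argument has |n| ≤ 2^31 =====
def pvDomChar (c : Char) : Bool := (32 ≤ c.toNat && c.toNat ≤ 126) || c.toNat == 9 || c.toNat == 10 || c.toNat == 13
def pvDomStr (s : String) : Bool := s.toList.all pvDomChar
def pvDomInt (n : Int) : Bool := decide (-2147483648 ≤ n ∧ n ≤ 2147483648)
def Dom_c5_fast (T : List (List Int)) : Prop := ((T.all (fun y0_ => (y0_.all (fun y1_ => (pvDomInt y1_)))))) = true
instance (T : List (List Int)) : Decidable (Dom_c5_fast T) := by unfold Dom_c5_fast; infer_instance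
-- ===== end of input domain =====

-- B replaces A's three matrix-matrix products (A2, A4, A5) by per-row vector propagation:
-- for each i it pushes row i through T four times and dots with column i, with O(n) extra
-- memory and no intermediate matrix; same O(n^3) arithmetic, different decomposition.

-- the Python matrix comprehension [[f(i,j) for j in range(n)] for i in range(n)] (A's shape)
def pyMatrix (n : Nat) (f : Nat → Nat → Int) : List (List Int) :=
  (List.range n).map (fun i => (List.range n).map (f i))

-- ===== PORT A =====
-- indices i,j,k come from range(n) and Pre_ makes every row at least n long, so the
-- T[i][k] accesses are in range and `getD … 0` is exact.
def c5_fast (T : List (List Int)) : Int :=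
  let n := T.length
  if n < 5 then 0
  else
    let A2 := pyMatrix n (fun i j =>
      ((List.range n).map (fun k => (T.getD i []).getD k 0 * (T.getD k []).getD j 0)).sum)
    let A4 := pyMatrix n (fun i j =>
      ((List.range n).map (fun k => (A2.getD i []).getD k 0 * (A2.getD k []).getD j 0)).sum)
    let A5 := pyMatrix n (fun i j =>
      ((List.range n).map (fun k => (A4.getD i []).getD k 0 * (T.getD k []).getD j 0)).sum)
    let tr5 := ((List.range n).map (fun i => (A5.getD i []).getD i 0)).sum
    PySem.Int.floordiv tr5 5

-- ===== PORT B =====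
def c5_fast_alt (T : List (List Int)) : Int :=
  let n := T.length
  if n < 5 then 0
  else
    let tr5 := (List.range n).foldl (fun acc i =>
      let w0 := (List.range n).map (fun j => (T.getD i []).getD j 0)
      let w := (List.range 3).foldl (fun w _ =>
        (List.range n).map (fun j =>
          ((List.range n).map (fun k => w.getD k 0 * (T.getD k []).getD j 0)).sum)) w0
      acc + ((List.range n).map (fun k => w.getD k 0 * (T.getD k []).getD i 0)).sum) 0
    PySem.Int.floordiv tr5 5

-- ===== PRECONDITION & SPEC =====
-- Pre_ excludes exactly the ragged inputs with 5 ≤ len(T) and some row shorter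
-- than len(T), on which the Python A raises IndexError (with len(T) < 5 it returns 0 first).
def Pre_c5_fast (T : List (List Int)) : Prop := T.length < 5 ∨ ∀ row ∈ T, T.length ≤ row.length
instance (T : List (List Int)) : Decidable (Pre_c5_fast T) := by unfold Pre_c5_fast; infer_instance

def pvWitness_c5_fast : List (List Int) :=
  [[0,1,1,0,0],[0,0,1,1,0],[0,0,0,1,1],[1,0,0,0,1],[1,1,0,0,0]]

def Spec_c5_fast (T : List (List Int)) (out : Int) : Prop := out = c5_fast_alt T
instance (T : List (List Int)) (out : Int) : Decidable (Spec_c5_fast T out) := by unfold Spec_c5_fast; infer_instance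

-- ===== CLAIM (what is proved, stated in full; the proofs are below) =====
def Claim_equal_c5_fast : Prop := ∀ (T : List (List Int)), Dom_c5_fast T → Pre_c5_fast T → Spec_c5_fast T (c5_fast T)

-- ===== LEMMAS AND PROOFS =====

lemma sum_map_range_eq (n : Nat) (f : Nat → Int) :
    ((List.range n).map f).sum = ∑ i ∈ Finset.range n, f i := rfl

lemma pyMatrix_getD (n : Nat) (f : Nat → Nat → Int) (i k : Nat)
    (hi : i < n) (hk : k < n) : ((pyMatrix n f).getD i []).getD k 0 = f i k := by
  unfold pyMatrix
  rw [PySem.List.getD_map_range _ n i [] hi, PySem.List.getD_map_range (f i) n k 0 hk]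

-- the sum Σ_{k<n} p[i][k]·q[k][j] is the (i,j) entry of the matrix product P·Q
lemma mul_bridge (n : Nat) (P Q : Matrix (Fin n) (Fin n) Int) (p q : Nat → Nat → Int)
    (hp : ∀ a b : Fin n, p a.val b.val = P a b) (hq : ∀ a b : Fin n, q a.val b.val = Q a b)
    (i j : Fin n) :
    ((List.range n).map (fun k => p i.val k * q k j.val)).sum = (P * Q) i j := by
  rw [sum_map_range_eq, Matrix.mul_apply,
      ← Fin.sum_univ_eq_sum_range (fun k => p i.val k * q k j.val) n]
  exact Finset.sum_congr rfl fun k _ => by rw [hp, hq]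

-- vector-matrix step: Σ_{k<n} w[k]·q[k][j] = (W·Q) i j when w is row i of W
lemma vec_bridge (n : Nat) (W Q : Matrix (Fin n) (Fin n) Int) (w : List Int) (q : Nat → Nat → Int)
    (i : Fin n) (hw : ∀ k : Fin n, w.getD k.val 0 = W i k)
    (hq : ∀ a b : Fin n, q a.val b.val = Q a b) (j : Fin n) :
    ((List.range n).map (fun k => w.getD k 0 * q k j.val)).sum = (W * Q) i j := by
  rw [sum_map_range_eq, Matrix.mul_apply,
      ← Fin.sum_univ_eq_sum_range (fun k => w.getD k 0 * q k j.val) n]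
  exact Finset.sum_congr rfl fun k _ => by rw [hw, hq]

-- ===== VERDICT (by name: the statement is the Claim_ definition above) =====
theorem c5_fast_spec : Claim_equal_c5_fast := by
  intro T _ _
  unfold Spec_c5_fast
  by_cases h : T.length < 5
  · simp [c5_fast, c5_fast_alt, h]
  · simp only [c5_fast, c5_fast_alt, if_neg h]
    congr 1
    set n := T.length with hn
    set t : Nat → Nat → Int := fun i j => (T.getD i []).getD j 0 with ht
    set M : Matrix (Fin n) (Fin n) Int := Matrix.of (fun i j : Fin n => t i.val j.val) with hM
    have hT : ∀ a b : Fin n, t a.val b.val = M a b := fun a b => rfl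
    -- entries of A's staged matrices
    have hA2 : ∀ a b : Fin n,
        ((pyMatrix n (fun i j => ((List.range n).map (fun k => t i k * t k j)).sum)).getD a.val []).getD b.val 0
        = (M * M) a b := fun a b => by
      rw [pyMatrix_getD _ _ _ _ a.isLt b.isLt]; exact mul_bridge n M M t t hT hT a b
    have hA4 : ∀ a b : Fin n,
        ((pyMatrix n (fun i j => ((List.range n).map (fun k =>
            ((pyMatrix n (fun i j => ((List.range n).map (fun k => t i k * t k j)).sum)).getD i []).getD k 0 *
            ((pyMatrix n (fun i j => ((List.range n).map (fun k => t i k * t k j)).sum)).getD k []).getD j 0)).sum)).getD a.val []).getD b.val 0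
        = ((M * M) * (M * M)) a b := fun a b => by
      rw [pyMatrix_getD _ _ _ _ a.isLt b.isLt]
      exact mul_bridge n (M * M) (M * M) (fun x y => ((pyMatrix n (fun i j => ((List.range n).map (fun k => t i k * t k j)).sum)).getD x []).getD y 0) (fun x y => ((pyMatrix n (fun i j => ((List.range n).map (fun k => t i k * t k j)).sum)).getD x []).getD y 0) hA2 hA2 a b
    -- A's trace
    have trA : ((List.range n).map (fun i =>
        ((pyMatrix n (fun i j => ((List.range n).map (fun k =>
          ((pyMatrix n (fun i j => ((List.range n).map (fun k =>
            ((pyMatrix n (fun i j => ((List.range n).map (fun k => t i k * t k j)).sum)).getD i []).getD k 0 *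
            ((pyMatrix n (fun i j => ((List.range n).map (fun k => t i k * t k j)).sum)).getD k []).getD j 0)).sum)).getD i []).getD k 0
          * t k j)).sum)).getD i []).getD i 0)).sum
        = ∑ i : Fin n, (((M * M) * (M * M)) * M) i i := by
      rw [sum_map_range_eq, ← Fin.sum_univ_eq_sum_range]
      refine Finset.sum_congr rfl fun i _ => ?_
      rw [pyMatrix_getD _ _ _ _ i.isLt i.isLt]
      exact mul_bridge n ((M * M) * (M * M)) M (fun x y => ((pyMatrix n (fun i j => ((List.range n).map (fun k => (fun x y => ((pyMatrix n (fun i j => ((List.range n).map (fun k => t i k * t k j)).sum)).getD x []).getD y 0) i k * (fun x y => ((pyMatrix n (fun i j => ((List.range n).map (fun k => t i k * t k j)).sum)).getD x []).getD y 0) k j)).sum)).getD x []).getD y 0) t hA4 hT i i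
    -- B's trace: unfold the three vector steps
    have h3 : List.range 3 = [0, 1, 2] := rfl
    have trB : (List.range n).foldl (fun acc i =>
        acc + ((List.range n).map (fun k =>
          ((List.range 3).foldl (fun w _ =>
            (List.range n).map (fun j => ((List.range n).map (fun k => w.getD k 0 * t k j)).sum))
            ((List.range n).map (fun j => t i j))).getD k 0 * t k i)).sum) 0
        = ∑ i : Fin n, ((((M * M) * M) * M) * M) i i := by
      rw [h3]
      simp only [List.foldl]
      rw [PySem.List.foldl_add, zero_add, sum_map_range_eq, ← Fin.sum_univ_eq_sum_range]
      refine Finset.sum_congr rfl fun i _ => ?_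
      have hw0 : ∀ k : Fin n, ((List.range n).map (fun j => t i.val j)).getD k.val 0 = M i k :=
        fun k => by rw [PySem.List.getD_map_range _ n k.val 0 k.isLt]; rfl
      have hw1 : ∀ k : Fin n,
          ((List.range n).map (fun j => ((List.range n).map (fun k =>
            ((List.range n).map (fun j => t i.val j)).getD k 0 * t k j)).sum)).getD k.val 0
          = (M * M) i k := fun k => by
        rw [PySem.List.getD_map_range _ n k.val 0 k.isLt]
        exact vec_bridge n M M _ t i hw0 hT k
      have hw2 : ∀ k : Fin n,
          ((List.range n).map (fun j => ((List.range n).map (fun k =>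
            ((List.range n).map (fun j => ((List.range n).map (fun k =>
              ((List.range n).map (fun j => t i.val j)).getD k 0 * t k j)).sum)).getD k 0 * t k j)).sum)).getD k.val 0
          = ((M * M) * M) i k := fun k => by
        rw [PySem.List.getD_map_range _ n k.val 0 k.isLt]
        exact vec_bridge n (M * M) M _ t i hw1 hT k
      have hw3 : ∀ k : Fin n,
          ((List.range n).map (fun j => ((List.range n).map (fun k =>
            ((List.range n).map (fun j => ((List.range n).map (fun k =>
              ((List.range n).map (fun j => ((List.range n).map (fun k =>
                ((List.range n).map (fun j => t i.val j)).getD k 0 * t k j)).sum)).getD k 0 * t k j)).sum)).getD k 0 * t k j)).sum)).getD k.val 0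
          = (((M * M) * M) * M) i k := fun k => by
        rw [PySem.List.getD_map_range _ n k.val 0 k.isLt]
        exact vec_bridge n ((M * M) * M) M _ t i hw2 hT k
      exact vec_bridge n (((M * M) * M) * M) M _ t i hw3 hT i
    rw [trA, trB]
    refine Finset.sum_congr rfl fun i _ => ?_
    rw [show ((M * M) * (M * M)) * M = ((((M * M) * M) * M) * M) from by
      rw [mul_assoc (M * M) M M]]
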